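-- pv_equiv track=rewrite | github.com/longnguyen2210/Python-codes | lnguyen-dinh-bao_PRG550B.211.TT1.py | checkRegex
-- ===== SOURCE A (Python) =====
-- def checkRegex(inputC):
--     a=0
--     b=0
--     c=0
--     if(inputC[0].isalpha() and len(inputC)>7):
--         for char in inputC:
--             if(char.isupper()):
--                 a=a+1
--             if(char.islower()):
--                 b=b+1
--             if char in "* - @ # $ . | / \ !":
--                 c=c+1
--         if(a>0 and b>0 and c>0)  :
--             return True
--         else:
--             return False
--
--
--
--
--     else:
--         return False
-- ===== SOURCE B (Python) =====
-- def checkRegex(inputC):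
--     if inputC[0].isalpha() and len(inputC) > 7:
--         return (any(ch.isupper() for ch in inputC)
--                 and any(ch.islower() for ch in inputC)
--                 and any(ch in "* - @ # $ . | / \ !" for ch in inputC))
--     return False
-- ===== Notes on version B (the rewrite author's own statement) =====
-- stated objective: idiomatic
-- what changed: Replaced the single counting loop with three counters by three independent short-circuiting any() existence scans combined with and (C-level generator scans that stop at the first hit).
import Mathlib
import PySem

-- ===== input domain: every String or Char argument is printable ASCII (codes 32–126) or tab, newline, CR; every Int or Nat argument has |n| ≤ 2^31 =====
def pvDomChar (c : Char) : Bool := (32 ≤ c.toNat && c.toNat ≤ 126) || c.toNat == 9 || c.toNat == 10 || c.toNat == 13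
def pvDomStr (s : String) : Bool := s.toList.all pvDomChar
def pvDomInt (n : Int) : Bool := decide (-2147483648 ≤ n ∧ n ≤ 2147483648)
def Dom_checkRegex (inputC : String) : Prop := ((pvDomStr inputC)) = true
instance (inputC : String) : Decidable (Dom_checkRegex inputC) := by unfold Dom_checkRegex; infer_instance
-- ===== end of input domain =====

-- B replaces A's single counting loop (three counters) by three independent any-scans; objective: idiomatic.


-- ===== PORT A =====
-- the chars of the Python literal "* - @ # $ . | / \ !"
def pvSpecials : List Char := "* - @ # $ . | / \\ !".toList

-- one iteration of A's loop body over the state (a, b, c)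
def pvStep (st : Int × Int × Int) (ch : Char) : Int × Int × Int :=
  let st := if PySem.Chars.isupper ch then (st.1 + 1, st.2.1, st.2.2) else st
  let st := if PySem.Chars.islower ch then (st.1, st.2.1 + 1, st.2.2) else st
  if pvSpecials.contains ch then (st.1, st.2.1, st.2.2 + 1) else st

def checkRegex (inputC : String) : Bool :=
  -- a=0; b=0; c=0
  -- inputC[0] raises IndexError on the empty string (excluded by Pre_); here pyGet? gives none
  match PySem.Str.pyGet? inputC 0 with
  | none => false
  | some c0 =>
    if PySem.Chars.isalpha c0 && decide ((PySem.Str.len inputC : Int) > 7) then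
      let st := inputC.toList.foldl pvStep (0, 0, 0)
      if st.1 > 0 && st.2.1 > 0 && st.2.2 > 0 then true else false
    else false

-- ===== PORT B =====
def checkRegex_alt (inputC : String) : Bool :=
  match PySem.Str.pyGet? inputC 0 with
  | none => false
  | some c0 =>
    if PySem.Chars.isalpha c0 && decide ((PySem.Str.len inputC : Int) > 7) then
      inputC.toList.any PySem.Chars.isupper
        && inputC.toList.any PySem.Chars.islower
        && inputC.toList.any (fun ch => pvSpecials.contains ch)
    else false

-- ===== PRECONDITION & SPEC =====
-- Pre_ excludes only the empty string, on which A raises IndexError at inputC[0].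
def Pre_checkRegex (inputC : String) : Prop := inputC ≠ ""
instance (inputC : String) : Decidable (Pre_checkRegex inputC) := by unfold Pre_checkRegex; infer_instance
def pvWitness_checkRegex : String := "Ab*cdefg"

def Spec_checkRegex (inputC : String) (out : Bool) : Prop := out = checkRegex_alt inputC
instance (inputC : String) (out : Bool) : Decidable (Spec_checkRegex inputC out) := by unfold Spec_checkRegex; infer_instance

-- ===== CLAIM (what is proved, stated in full; the proofs are below) =====
def Claim_equal_checkRegex : Prop := ∀ (inputC : String), Dom_checkRegex inputC → Pre_checkRegex inputC → Spec_checkRegex inputC (checkRegex inputC)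

-- ===== LEMMAS AND PROOFS =====

-- A's loop computes, from any start state, the start state plus the three counts.
theorem pvFold_eq (l : List Char) (a b c : Int) :
    l.foldl pvStep (a, b, c)
      = (a + l.countP PySem.Chars.isupper,
         b + l.countP PySem.Chars.islower,
         c + l.countP (fun ch => pvSpecials.contains ch)) := by
  induction l generalizing a b c with
  | nil => simp
  | cons x xs ih =>
    simp only [List.foldl_cons, List.countP_cons]
    by_cases h1 : PySem.Chars.isupper x <;>
    by_cases h2 : PySem.Chars.islower x <;>
    by_cases h3 : x ∈ pvSpecials <;>
      simp [pvStep, h1, h2, h3, ih, Prod.ext_iff] <;> omega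

theorem pvCountP_pos_iff_any (l : List Char) (p : Char → Bool) :
    (((0 : Int) + l.countP p > 0) = true) ↔ l.any p = true := by
  simp [List.any_eq_true, List.countP_pos_iff]

-- ===== VERDICT (by name: the statement is the Claim_ definition above) =====
theorem checkRegex_spec : Claim_equal_checkRegex := by
  intro inputC _ _
  unfold Spec_checkRegex checkRegex checkRegex_alt
  cases h : PySem.Str.pyGet? inputC 0 with
  | none => rfl
  | some c0 =>
    dsimp only
    by_cases hg : PySem.Chars.isalpha c0 && decide ((PySem.Str.len inputC : Int) > 7)
    · rw [if_pos hg, if_pos hg, pvFold_eq]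
      by_cases hu : inputC.toList.any PySem.Chars.isupper <;>
      by_cases hl : inputC.toList.any PySem.Chars.islower <;>
      by_cases hs : inputC.toList.any (fun ch => pvSpecials.contains ch) <;>
        simp only [hu, hl, hs, Bool.and_true, Bool.and_false] <;>
        simp_all only [← pvCountP_pos_iff_any] <;>
        simp_all
    · rw [if_neg hg, if_neg hg]
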